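-- pv_equiv track=rewrite | github.com/antonegas/kattis | exercises08/dictionary_attack.py | get_unacceptable
-- ===== SOURCE A (Python) =====
-- def get_unacceptable(words: list[str]) -> list[set[str]]:
--     unacceptable = [set(words)]
--
--     for _ in range(3):
--         unaccepatble_words = set()
--         for word in unacceptable[-1]:
--             for i in range(len(word) - 1):
--                 unaccepatble_words.add(word[:i] + word[i + 1] + word[i] + word[i + 2:])
--         unacceptable.append(unacceptable[-1].union(unaccepatble_words))
--
--     return unacceptable
-- ===== SOURCE B (Python) =====
-- def get_unacceptable(words: list[str]) -> list[set[str]]: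
--     # Recursive decomposition: a round is one 'expand' step; a word's adjacent
--     # transpositions come from an element swap in a character-list copy
--     # (a generator), and a round's swap set from one set comprehension.
--     def neighbors(word):
--         chars = list(word)
--         for i in range(len(chars) - 1):
--             swapped = chars.copy()
--             swapped[i], swapped[i + 1] = swapped[i + 1], swapped[i]
--             yield ''.join(swapped)
--
--     def expand(level, rounds):
--         if rounds == 0:
--             return [level]
--         nxt = level.union({c for w in level for c in neighbors(w)})
--         return [level] + expand(nxt, rounds - 1)
--
--     return expand(set(words), 3)
-- ===== Notes on version B (the rewrite author's own statement) =====
-- stated objective: alternative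
-- what changed: Replaces the imperative snapshot-list loop with a recursive round function, and the string-slicing neighbor construction with an element swap on a character-list copy yielded by a generator and collected by one set comprehension.
import Mathlib
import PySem

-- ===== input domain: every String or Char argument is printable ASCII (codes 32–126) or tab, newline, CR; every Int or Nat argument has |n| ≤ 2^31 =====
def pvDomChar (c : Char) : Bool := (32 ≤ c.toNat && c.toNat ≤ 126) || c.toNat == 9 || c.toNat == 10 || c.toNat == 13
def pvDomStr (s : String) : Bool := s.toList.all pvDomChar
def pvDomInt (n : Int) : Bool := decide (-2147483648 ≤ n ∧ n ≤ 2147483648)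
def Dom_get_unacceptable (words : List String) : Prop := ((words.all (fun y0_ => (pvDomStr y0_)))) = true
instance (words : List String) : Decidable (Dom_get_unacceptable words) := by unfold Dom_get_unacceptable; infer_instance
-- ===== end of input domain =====

-- B trades A's imperative snapshot-list loop for a recursive round function, and A's
-- string-slice neighbor construction for an element swap on a character-list copy,
-- collected by a set comprehension (alternative decomposition, same cost).
-- Python returns list[set[str]]; sets are PySem.Set, inner lists hold the distinct elements.

-- ===== PORT A =====
-- word[:i] + word[i + 1] + word[i] + word[i + 2:], on the character list.
-- pyGetD with a dummy default is exact here: A's loop only uses 0 ≤ i < len(word) - 1,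
-- so i and i + 1 are in range and Python's word[i], word[i+1] never raise.
def pvSwap (word : String) (i : Int) : String :=
  String.ofList (PySem.List.slice word.toList none (some i)
    ++ PySem.List.pyGetD word.toList (i + 1) ' '
    :: PySem.List.pyGetD word.toList i ' '
    :: PySem.List.slice word.toList (some (i + 2)) none)

def get_unacceptable (words : List String) : List (List String) :=
  let init : List (PySem.Set String) := [PySem.Set.ofList words]
  (PySem.List.pyRange 0 3 1).foldl
    (fun unacceptable _ =>
      let unaccepatble_words := (PySem.List.pyGetD unacceptable (-1) []).foldl
        (fun acc word =>
          (PySem.List.pyRange 0 (PySem.Str.len word - 1) 1).foldl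
            (fun acc2 i => PySem.Set.add acc2 (pvSwap word i)) acc)
        PySem.Set.empty
      unacceptable ++
        [PySem.Set.union (PySem.List.pyGetD unacceptable (-1) []) unaccepatble_words])
    init

-- ===== PORT B =====
-- neighbors(word): swapped = chars.copy(); swapped[i], swapped[i+1] = swapped[i+1], swapped[i].
-- The tuple assignment reads both right-hand sides from the copy (= chars) first; both indices
-- are in range for 0 ≤ i < len(chars) - 1, so pySetD/pyGetD are exact (no IndexError path).
def pvNeighbors (word : String) : List String :=
  let chars := word.toList
  (PySem.List.pyRange 0 ((chars.length : Int) - 1) 1).map (fun i =>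
    String.ofList
      (PySem.List.pySetD
        (PySem.List.pySetD chars i (PySem.List.pyGetD chars (i + 1) ' '))
        (i + 1) (PySem.List.pyGetD chars i ' ')))

-- expand(level, rounds); the set comprehension {c for w in level for c in neighbors(w)}
-- is Set.ofList of the concatenated neighbor lists.
def pvExpand (level : PySem.Set String) (rounds : Nat) : List (PySem.Set String) :=
  match rounds with
  | 0 => [level]
  | r + 1 =>
    let nxt := PySem.Set.union level (PySem.Set.ofList (level.flatMap pvNeighbors))
    level :: pvExpand nxt r

def get_unacceptable_alt (words : List String) : List (List String) :=
  pvExpand (PySem.Set.ofList words) 3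

-- ===== PRECONDITION & SPEC =====
def Spec_get_unacceptable (words : List String) (out : List (List String)) : Prop := out = get_unacceptable_alt words
instance (words : List String) (out : List (List String)) : Decidable (Spec_get_unacceptable words out) := by unfold Spec_get_unacceptable; infer_instance

-- ===== CLAIM (what is proved, stated in full; the proofs are below) =====
def Claim_equal_get_unacceptable : Prop := ∀ (words : List String), Dom_get_unacceptable words → Spec_get_unacceptable words (get_unacceptable words)

-- ===== LEMMAS AND PROOFS =====

-- the list of adjacent-transposition neighbors of one word as A generates them, in order
def pvCands (word : String) : List String :=
  (PySem.List.pyRange 0 (PySem.Str.len word - 1) 1).map (pvSwap word)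

-- the swap on lists: take/element/element/drop = double set, for an in-range index
theorem pv_swap_lists : ∀ (n : Nat) (chars : List Char), n + 1 < chars.length →
    chars.take n ++ chars.getD (n + 1) ' ' :: chars.getD n ' ' :: chars.drop (n + 2)
      = (chars.set n (chars.getD (n + 1) ' ')).set (n + 1) (chars.getD n ' ') := by
  intro n
  induction n with
  | zero =>
    intro chars h
    match chars, h with
    | a :: b :: t, _ => simp
  | succ n ih =>
    intro chars h
    match chars, h with
    | a :: t, h =>
      have ht : n + 1 < t.length := by simpa using h
      simpa using ih t ht

-- A's slice-built swap equals B's set-built swap on the range both loops use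
theorem pv_swap_eq (word : String) (i : Int) (h0 : 0 ≤ i)
    (h1 : i < (word.toList.length : Int) - 1) :
    pvSwap word i
      = String.ofList
          (PySem.List.pySetD
            (PySem.List.pySetD word.toList i (PySem.List.pyGetD word.toList (i + 1) ' '))
            (i + 1) (PySem.List.pyGetD word.toList i ' ')) := by
  set chars := word.toList with hchars
  obtain ⟨n, rfl⟩ : ∃ n : Nat, i = (n : Int) := ⟨i.toNat, (Int.toNat_of_nonneg h0).symm⟩
  have hn : n + 1 < chars.length := by exact_mod_cast (by omega : (n : Int) + 1 < (chars.length : Int))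
  have hcast : ((n : Int) + 1) = ((n + 1 : Nat) : Int) := by push_cast; ring
  have hcast2 : ((n : Int) + 2) = ((n + 2 : Nat) : Int) := by push_cast; ring
  rw [pvSwap, ← hchars, hcast, hcast2]
  rw [PySem.List.slice_to_natCast, PySem.List.slice_from_natCast,
    PySem.List.pyGetD_natCast, PySem.List.pyGetD_natCast,
    PySem.List.pySetD_natCast, PySem.List.pySetD_natCast]
  exact congrArg String.ofList (pv_swap_lists n chars hn)

-- hence A's neighbor list and B's neighbor list of a word are the same list
theorem pv_cands_eq_neighbors (word : String) : pvCands word = pvNeighbors word := by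
  rw [pvCands, pvNeighbors]
  have hlen : PySem.Str.len word = (word.toList.length : Int) := rfl
  rw [hlen]
  refine List.map_congr_left ?_
  intro i hi
  have := (PySem.List.mem_pyRange_one (a := 0) (b := (word.toList.length : Int) - 1) (x := i)).mp hi
  exact pv_swap_eq word i this.1 (by omega)

-- A's double loop over a level, started from acc, is one update with the flattened candidates
theorem pvA_inner : ∀ (l : List String) (acc : PySem.Set String),
    l.foldl (fun acc word =>
        (PySem.List.pyRange 0 (PySem.Str.len word - 1) 1).foldl
          (fun acc2 i => PySem.Set.add acc2 (pvSwap word i)) acc) acc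
      = PySem.Set.update acc (l.flatMap pvCands) := by
  intro l
  induction l with
  | nil => intro acc; rfl
  | cons w l ih =>
    intro acc
    show l.foldl _ ((PySem.List.pyRange 0 (PySem.Str.len w - 1) 1).foldl
        (fun acc2 i => PySem.Set.add acc2 (pvSwap w i)) acc) = _
    rw [← PySem.Set.update_map_eq_foldl_add, ih, List.flatMap_cons, PySem.Set.update_append]
    rfl

-- one A-round in closed form
def pvStepA (s : PySem.Set String) : PySem.Set String :=
  PySem.Set.update s (PySem.Set.ofList (s.flatMap pvCands))

theorem pvA_eq (words : List String) :
    get_unacceptable words =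
      [PySem.Set.ofList words,
       pvStepA (PySem.Set.ofList words),
       pvStepA (pvStepA (PySem.Set.ofList words)),
       pvStepA (pvStepA (pvStepA (PySem.Set.ofList words)))] := by
  have h3 : PySem.List.pyRange 0 3 1 = [0, 1, 2] := rfl
  unfold get_unacceptable
  rw [h3]
  simp only [List.foldl_cons, List.foldl_nil, pvA_inner]
  have hone : ∀ (a : PySem.Set String),
      PySem.List.pyGetD [a] (-1) ([] : PySem.Set String) = a := fun a =>
    PySem.List.pyGetD_neg_one_append_singleton (xs := []) (x := a) (d := [])
  have hstep : ∀ (s : PySem.Set String),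
      PySem.Set.union s (PySem.Set.update PySem.Set.empty (s.flatMap pvCands)) = pvStepA s := by
    intro s
    rw [pvStepA, ← PySem.Set.update_nil_left]
    rfl
  simp only [hone, PySem.List.pyGetD_neg_one_append_singleton, hstep]
  rfl

-- B's round step is A's closed-form step: union = update, and the neighbor lists coincide
theorem pvB_step (s : PySem.Set String) :
    PySem.Set.union s (PySem.Set.ofList (s.flatMap pvNeighbors)) = pvStepA s := by
  have h : s.flatMap pvNeighbors = s.flatMap pvCands := by
    simp [List.flatMap, funext pv_cands_eq_neighbors]
  rw [h, pvStepA, ← PySem.Set.update_nil_left]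
  rfl

theorem pvB_eq (words : List String) :
    get_unacceptable_alt words =
      [PySem.Set.ofList words,
       pvStepA (PySem.Set.ofList words),
       pvStepA (pvStepA (PySem.Set.ofList words)),
       pvStepA (pvStepA (pvStepA (PySem.Set.ofList words)))] := by
  show pvExpand (PySem.Set.ofList words) 3 = _
  rw [pvExpand, pvExpand, pvExpand, pvExpand]
  simp only [pvB_step]

-- ===== VERDICT (by name: the statement is the Claim_ definition above) =====
theorem get_unacceptable_spec : Claim_equal_get_unacceptable := by
  intro words _hdom
  show get_unacceptable words = get_unacceptable_alt words
  rw [pvA_eq, pvB_eq]
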